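-- pv_equiv track=rewrite | github.com/robbiepope/DepMap_MiningGeneDependencies_ | DepMapTools/Correlations.py | common_key_3
-- ===== SOURCE A (Python) =====
-- def common_key_3(dict_a, dict_b, dict_c):
--     """
--     Find the genes (common keys) present in three dictionaries of gene essentiality correlations
--
--     :param dict_a: (DICT) Dictionary of genes (keys) and correlations (values) for a GOI
--     :param dict_b: (DICT) Dictionary of genes (keys) and correlations (values) for a GOI
--     :param dict_c: (DICT) Dictionary of genes (keys) and correlations (values) for a GOI
--     :return dict1: (DICT) Dictionary of common genes (keys) and correlations (values) for a GOI
--     """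
--
--     list1 = []
--     dict1 = {}
--     for i in dict_a.keys():
--         for j in dict_b.keys():
--             for k in dict_c.keys():
--                 if i == j and j == k:
--                     list1.append(i)
--     for k in list1:
--         dict1.update({k: [dict_a[k],
--                           dict_b[k],
--                           dict_c[k]
--                           ]
--                       }
--                      )
--     return dict1
-- ===== SOURCE B (Python) =====
-- def common_key_3(dict_a, dict_b, dict_c):
--     return {k: [dict_a[k], dict_b[k], dict_c[k]]
--             for k in dict_a if k in dict_b and k in dict_c}
-- ===== Notes on version B (the rewrite author's own statement) =====
-- stated objective: faster
-- what changed: Replaces A's triple-nested scan over all key triples plus a second update loop with a single dict-comprehension pass over dict_a using hash-membership tests in dict_b and dict_c.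
import Mathlib
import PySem

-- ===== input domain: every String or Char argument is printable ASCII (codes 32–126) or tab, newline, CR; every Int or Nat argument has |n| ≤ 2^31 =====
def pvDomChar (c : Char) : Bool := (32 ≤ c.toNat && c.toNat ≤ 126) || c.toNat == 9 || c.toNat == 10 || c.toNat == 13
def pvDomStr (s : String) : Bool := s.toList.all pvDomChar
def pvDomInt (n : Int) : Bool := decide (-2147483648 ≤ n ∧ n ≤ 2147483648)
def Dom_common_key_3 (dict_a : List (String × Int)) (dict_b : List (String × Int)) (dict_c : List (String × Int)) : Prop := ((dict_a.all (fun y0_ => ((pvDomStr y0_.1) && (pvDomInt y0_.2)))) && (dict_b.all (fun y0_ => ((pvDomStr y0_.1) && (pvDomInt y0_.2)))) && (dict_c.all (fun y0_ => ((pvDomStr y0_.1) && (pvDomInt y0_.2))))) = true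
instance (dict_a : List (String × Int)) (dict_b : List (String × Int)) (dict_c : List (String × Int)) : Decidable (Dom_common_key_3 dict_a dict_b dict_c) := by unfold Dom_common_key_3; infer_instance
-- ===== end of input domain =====

-- B replaces A's triple-nested key scan plus update loop by a single dict-comprehension pass
-- over dict_a with membership tests (objective: faster, one pass instead of |a|·|b|·|c| comparisons).

-- ===== PORT A =====
def common_key_3 (dict_a : List (String × Int)) (dict_b : List (String × Int)) (dict_c : List (String × Int)) : List (String × List Int) :=
  let list1 : List String :=
    dict_a.foldl (fun acc1 i =>
      dict_b.foldl (fun acc2 j =>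
        dict_c.foldl (fun acc3 k =>
          if i.1 == j.1 && j.1 == k.1 then acc3 ++ [i.1] else acc3) acc2) acc1) []
  let dict1 : PySem.Dict String (List Int) :=
    list1.foldl (fun d k =>
      d.insert k [(PySem.Dict.mk dict_a).getD k 0,
                  (PySem.Dict.mk dict_b).getD k 0,
                  (PySem.Dict.mk dict_c).getD k 0]) PySem.Dict.empty
  dict1.items

-- ===== PORT B =====
def common_key_3_alt (dict_a : List (String × Int)) (dict_b : List (String × Int)) (dict_c : List (String × Int)) : List (String × List Int) :=
  ((dict_a.map Prod.fst).filter (fun k =>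
      (PySem.Dict.mk dict_b).contains k && (PySem.Dict.mk dict_c).contains k)).map
    (fun k => (k, [(PySem.Dict.mk dict_a).getD k 0,
                   (PySem.Dict.mk dict_b).getD k 0,
                   (PySem.Dict.mk dict_c).getD k 0]))

-- ===== PRECONDITION & SPEC =====
-- Pre_ requires the three association lists to have pairwise-distinct keys: the Python arguments
-- are dicts, whose keys are necessarily distinct, so lists with duplicate keys encode no Python input.
def Pre_common_key_3 (dict_a : List (String × Int)) (dict_b : List (String × Int)) (dict_c : List (String × Int)) : Prop :=
  (dict_a.map Prod.fst).Nodup ∧ (dict_b.map Prod.fst).Nodup ∧ (dict_c.map Prod.fst).Nodup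
instance (dict_a : List (String × Int)) (dict_b : List (String × Int)) (dict_c : List (String × Int)) : Decidable (Pre_common_key_3 dict_a dict_b dict_c) := by unfold Pre_common_key_3; infer_instance
def pvWitness_common_key_3 : (List (String × Int)) × (List (String × Int)) × (List (String × Int)) :=
  ([("a", 1), ("b", 2)], [("a", 3), ("c", 4)], [("a", 5), ("b", 6)])
def Spec_common_key_3 (dict_a : List (String × Int)) (dict_b : List (String × Int)) (dict_c : List (String × Int)) (out : List (String × List Int)) : Prop := out = common_key_3_alt dict_a dict_b dict_c
instance (dict_a : List (String × Int)) (dict_b : List (String × Int)) (dict_c : List (String × Int)) (out : List (String × List Int)) : Decidable (Spec_common_key_3 dict_a dict_b dict_c out) := by unfold Spec_common_key_3; infer_instance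

-- ===== CLAIM (what is proved, stated in full; the proofs are below) =====
def Claim_equal_common_key_3 : Prop := ∀ (dict_a : List (String × Int)) (dict_b : List (String × Int)) (dict_c : List (String × Int)), Dom_common_key_3 dict_a dict_b dict_c → Pre_common_key_3 dict_a dict_b dict_c → Spec_common_key_3 dict_a dict_b dict_c (common_key_3 dict_a dict_b dict_c)

-- ===== LEMMAS AND PROOFS =====

-- The innermost loop over dict_c: with distinct keys in c it appends i.1 once iff i.1 = j.1 and j.1 is a key of c.
theorem pv_cfold (c : List (String × Int)) (hc : (c.map Prod.fst).Nodup) (x s : String) (acc : List String) :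
    c.foldl (fun acc3 k => if x == s && s == k.1 then acc3 ++ [x] else acc3) acc
      = acc ++ (if x == s && decide (s ∈ c.map Prod.fst) then [x] else []) := by
  induction c generalizing acc with
  | nil => simp
  | cons p cs ih =>
    simp only [List.map_cons, List.nodup_cons] at hc
    obtain ⟨hp, hcs⟩ := hc
    simp only [List.foldl_cons, List.map_cons, List.mem_cons]
    rw [ih hcs]
    by_cases hxs : x = s
    · subst hxs
      by_cases hsp : x = p.1
      · subst hsp
        simp [hp]
      · rw [decide_eq_decide.mpr (or_iff_right hsp)]
        · simp [hsp]
        · infer_instance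
    · simp [hxs]

-- The middle loop over dict_b: with distinct keys in b and c it appends x once iff x is a key of both b and c.
theorem pv_bfold (b c : List (String × Int)) (hb : (b.map Prod.fst).Nodup) (hc : (c.map Prod.fst).Nodup)
    (x : String) (acc : List String) :
    b.foldl (fun acc2 j => c.foldl (fun acc3 k => if x == j.1 && j.1 == k.1 then acc3 ++ [x] else acc3) acc2) acc
      = acc ++ (if decide (x ∈ b.map Prod.fst) && decide (x ∈ c.map Prod.fst) then [x] else []) := by
  induction b generalizing acc with
  | nil => simp
  | cons p bs ih =>
    simp only [List.map_cons, List.nodup_cons] at hb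
    obtain ⟨hp, hbs⟩ := hb
    simp only [List.foldl_cons, List.map_cons, List.mem_cons]
    rw [pv_cfold c hc x p.1, ih hbs]
    by_cases hxp : x = p.1
    · subst hxp
      rw [decide_eq_decide.mpr (iff_true_intro (Or.inl rfl : p.1 = p.1 ∨ p.1 ∈ List.map Prod.fst bs)),
          decide_eq_false hp]
      by_cases hxc : p.1 ∈ c.map Prod.fst
      · rw [decide_eq_true hxc]; simp
      · rw [decide_eq_false hxc]; simp
      · infer_instance
    · rw [decide_eq_decide.mpr (or_iff_right hxp)]
      · simp [hxp]
      · infer_instance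

-- The key-collecting phase of A equals a filter of dict_a's key list.
theorem pv_list1 (a b c : List (String × Int)) (hb : (b.map Prod.fst).Nodup) (hc : (c.map Prod.fst).Nodup)
    (acc : List String) :
    a.foldl (fun acc1 i =>
        b.foldl (fun acc2 j =>
          c.foldl (fun acc3 k => if i.1 == j.1 && j.1 == k.1 then acc3 ++ [i.1] else acc3) acc2) acc1) acc
      = acc ++ (a.map Prod.fst).filter
          (fun x => (PySem.Dict.mk b).contains x && (PySem.Dict.mk c).contains x) := by
  induction a generalizing acc with
  | nil => simp
  | cons p as ih =>
    simp only [List.foldl_cons, List.map_cons, List.filter_cons]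
    rw [pv_bfold b c hb hc p.1, ih]
    by_cases hbm : p.1 ∈ b.map Prod.fst <;> by_cases hcm : p.1 ∈ c.map Prod.fst <;>
      simp [PySem.Dict.contains_eq_decide_mem_keys, PySem.Dict.keys, hbm, hcm]

-- ===== VERDICT (by name: the statement is the Claim_ definition above) =====
theorem common_key_3_spec : Claim_equal_common_key_3 := by
  intro a b c _hdom hpre
  obtain ⟨ha, hb, hc⟩ := hpre
  unfold Spec_common_key_3 common_key_3 common_key_3_alt
  rw [pv_list1 a b c hb hc []]
  simp only [List.nil_append]
  set P : String → Bool := fun x => (PySem.Dict.mk b).contains x && (PySem.Dict.mk c).contains x with hP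
  have h2 := PySem.Dict.items_foldl_insert_fresh
      ((a.map Prod.fst).filter P) (fun s => s)
      (fun k => [(PySem.Dict.mk a).getD k 0, (PySem.Dict.mk b).getD k 0, (PySem.Dict.mk c).getD k 0])
      PySem.Dict.empty (fun x _ => by simp) (by simpa using ha.filter P)
  simpa using h2
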